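-- pv_equiv track=rewrite | github.com/wubek/ProjectEuler | euler/euler065.py | make_e_frac_list
-- ===== SOURCE A (Python) =====
-- def make_e_frac_list(limit):
--     result = [2]
--     count = 2
--     for i in range(1, limit + 1):
--         if i % 3 == 2:
--             result.append(count)
--             count += 2
--         else:
--             result.append(1)
--     return result
-- ===== SOURCE B (Python) =====
-- def make_e_frac_list(limit):
--     n = max(limit, 0)
--     result = [2] + [1] * n
--     result[2::3] = [2 * k for k in range(1, (n + 1) // 3 + 1)]
--     return result
-- ===== Notes on version B (the rewrite author's own statement) =====
-- stated objective: alternative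
-- what changed: B allocates an array of ones with a leading two up front and overwrites the stride-3 positions with the closed-form even values via an extended slice assignment, eliminating A's per-index loop with its modulo branch and running counter.
import Mathlib
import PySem

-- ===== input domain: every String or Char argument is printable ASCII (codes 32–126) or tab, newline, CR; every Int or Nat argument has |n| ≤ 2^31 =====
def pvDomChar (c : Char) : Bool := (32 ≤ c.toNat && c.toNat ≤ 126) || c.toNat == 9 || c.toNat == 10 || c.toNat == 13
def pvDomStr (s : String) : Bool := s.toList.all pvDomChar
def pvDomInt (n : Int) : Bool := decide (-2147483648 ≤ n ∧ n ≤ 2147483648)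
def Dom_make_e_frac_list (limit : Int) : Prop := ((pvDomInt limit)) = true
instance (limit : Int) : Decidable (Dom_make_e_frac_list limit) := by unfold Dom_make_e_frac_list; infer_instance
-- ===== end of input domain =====

-- B allocates an array of ones with a leading two and overwrites the stride-3
-- positions with the closed-form even values via slice assignment, instead of A's
-- per-index loop with a modulo branch and a running counter (objective: alternative).

-- ===== PORT A =====
def pvStepA (st : List Int × Int) (i : Int) : List Int × Int :=
  if PySem.Int.mod i 3 = 2 then (st.1 ++ [st.2], st.2 + 2) else (st.1 ++ [1], st.2)

def make_e_frac_list (limit : Int) : List Int :=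
  ((PySem.List.pyRange 1 (limit + 1) 1).foldl pvStepA ([2], 2)).1

-- ===== PORT B =====
-- Python's extended-slice assignment xs[c::step] = vals, exact when vals has the same
-- length as the slice (B constructs exactly that many values): walk the list with a
-- countdown; at 0 write the next value and reset the countdown to step - 1.
def pvScatter : List Int → Nat → Nat → List Int → List Int
  | [], _, _, _ => []
  | _ :: xs, 0, step, v :: vs => v :: pvScatter xs (step - 1) step vs
  | x :: xs, 0, _, [] => x :: xs
  | x :: xs, c + 1, step, vs => x :: pvScatter xs c step vs

-- the comprehension [2 * k for k in range(1, m + 1)] (generalised start for the proof)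
def pvVals (a m : Nat) : List Int := (List.range' a m).map (fun k => 2 * (k : Int))

def make_e_frac_list_alt (limit : Int) : List Int :=
  let n := (max limit 0).toNat
  let result := 2 :: List.replicate n (1 : Int)
  pvScatter result 2 3 (pvVals 1 ((n + 1) / 3))

-- ===== PRECONDITION & SPEC =====
def Spec_make_e_frac_list (limit : Int) (out : List Int) : Prop := out = make_e_frac_list_alt limit
instance (limit : Int) (out : List Int) : Decidable (Spec_make_e_frac_list limit out) := by unfold Spec_make_e_frac_list; infer_instance

-- ===== CLAIM (what is proved, stated in full; the proofs are below) =====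
def Claim_equal_make_e_frac_list : Prop := ∀ (limit : Int), Dom_make_e_frac_list limit → Spec_make_e_frac_list limit (make_e_frac_list limit)

-- ===== LEMMAS AND PROOFS =====

-- canonical continued-fraction coefficients of e: element at index i ≥ 1
def pvElem (i : Nat) : Int := if i % 3 = 2 then 2 * ((i + 1) / 3) else 1
-- the first n+1 coefficients
def pvP (n : Nat) : List Int := 2 :: (List.range' 1 n).map pvElem

lemma pvP_succ (n : Nat) : pvP (n + 1) = pvP n ++ [pvElem (n + 1)] := by
  simp [pvP, List.range'_concat, Nat.add_comm]

lemma pvA_fold (n : Nat) :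
    (PySem.List.pyRange 1 ((n : Int) + 1) 1).foldl pvStepA ([2], 2)
      = (pvP n, 2 + 2 * (((n + 1) / 3 : Nat) : Int)) := by
  induction n with
  | zero => simp [pvP]
  | succ n ih =>
    have h1 : (((n + 1 : Nat) : Int) + 1) = ((n : Int) + 1) + 1 := by push_cast; ring
    rw [h1, PySem.List.pyRange_one_succ_right (by omega)]
    rw [List.foldl_append, ih]
    simp only [List.foldl]
    have hmod : PySem.Int.mod ((n : Int) + 1) 3 = ((n : Int) + 1) % 3 :=
      PySem.Int.mod_eq_emod_of_pos (by omega)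
    by_cases h : (n + 1) % 3 = 2
    · have hc : PySem.Int.mod ((n : Int) + 1) 3 = 2 := by rw [hmod]; omega
      rw [pvStepA, if_pos hc, pvP_succ]
      have he : pvElem (n + 1) = 2 + 2 * (((n + 1) / 3 : Nat) : Int) := by
        simp only [pvElem, if_pos h]; push_cast; omega
      have hc2 : (2 : Int) + 2 * (((n + 1 + 1) / 3 : Nat) : Int) = 2 + 2 * (((n + 1) / 3 : Nat) : Int) + 2 := by
        push_cast; omega
      rw [he, hc2]
    · have hc : ¬ PySem.Int.mod ((n : Int) + 1) 3 = 2 := by rw [hmod]; omega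
      rw [pvStepA, if_neg hc, pvP_succ]
      have he : pvElem (n + 1) = 1 := by simp only [pvElem, if_neg h]
      have hc2 : (2 : Int) + 2 * (((n + 1 + 1) / 3 : Nat) : Int) = 2 + 2 * (((n + 1) / 3 : Nat) : Int) := by
        push_cast; omega
      rw [he, hc2]

lemma pvA_eq_P (limit : Int) : make_e_frac_list limit = pvP limit.toNat := by
  unfold make_e_frac_list
  rcases le_or_gt limit 0 with h | h
  · rw [PySem.List.pyRange_one_eq_nil (by omega)]
    simp [pvP, Int.toNat_of_nonpos h]
  · have : limit = (limit.toNat : Int) := by omega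
    rw [this, pvA_fold]
    simp only [Int.toNat_natCast]

lemma pvElem_block1 (m : Nat) : pvElem (3 * m + 1) = 1 := by
  simp only [pvElem]; rw [if_neg (by omega)]

lemma pvElem_block2 (m : Nat) : pvElem (3 * m + 2) = 2 * ((m : Int) + 1) := by
  simp only [pvElem]; rw [if_pos (by omega)]; push_cast; omega

lemma pvElem_block3 (m : Nat) : pvElem (3 * m + 3) = 1 := by
  simp only [pvElem]; rw [if_neg (by omega)]

lemma pvVals_succ (a m : Nat) : pvVals a (m + 1) = 2 * (a : Int) :: pvVals (a + 1) m := by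
  simp [pvVals, List.range'_succ]

-- the scatter over the tail, processed in [1, 2(t+1), 1] blocks
lemma pvScatter_blocks : ∀ (q : Nat), ∀ (s t : Nat), s ≤ 2 →
    pvScatter (List.replicate (3 * q + s) (1 : Int)) 1 3
        (pvVals (t + 1) (q + (if s = 2 then 1 else 0)))
      = (List.range' (3 * t + 1) (3 * q + s)).map pvElem := by
  intro q
  induction q with
  | zero =>
    intro s t hs
    interval_cases s
    · simp [pvVals, pvScatter]
    · simp [pvVals, pvScatter, List.range'_succ, pvElem_block1]
    · simp [pvVals, pvScatter, List.range'_succ, pvElem_block1,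
        show 3 * t + 1 + 1 = 3 * t + 2 from by omega, pvElem_block2]
  | succ q ih =>
    intro s t hs
    have hrep : 3 * (q + 1) + s = (3 * q + s) + 1 + 1 + 1 := by omega
    have hm : q + 1 + (if s = 2 then 1 else 0) = (q + (if s = 2 then 1 else 0)) + 1 := by omega
    rw [hrep, hm, pvVals_succ]
    simp only [List.replicate_succ, pvScatter]
    rw [ih s (t + 1) hs]
    rw [List.range'_succ, List.map_cons, pvElem_block1, List.range'_succ, List.map_cons,
      show 3 * t + 1 + 1 = 3 * t + 2 from by omega, pvElem_block2, List.range'_succ, List.map_cons,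
      show 3 * t + 2 + 1 = 3 * t + 3 from by omega, pvElem_block3,
      show 3 * (t + 1) + 1 = 3 * t + 3 + 1 from by omega]
    push_cast
    ring_nf

lemma pvB_eq_P (limit : Int) : make_e_frac_list_alt limit = pvP limit.toNat := by
  unfold make_e_frac_list_alt
  have hn : (max limit 0).toNat = limit.toNat := by omega
  simp only [hn]
  obtain ⟨q, s, hs, hqs⟩ : ∃ q s, s ≤ 2 ∧ limit.toNat = 3 * q + s :=
    ⟨limit.toNat / 3, limit.toNat % 3, by omega, by omega⟩
  have hm : (limit.toNat + 1) / 3 = q + (if s = 2 then 1 else 0) := by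
    rcases (by omega : s = 0 ∨ s = 1 ∨ s = 2) with h | h | h <;> simp [h, hqs] <;> omega
  show pvScatter (2 :: List.replicate limit.toNat (1 : Int)) 2 3 (pvVals 1 ((limit.toNat + 1) / 3)) = pvP limit.toNat
  rw [hm, hqs]
  simp only [pvScatter]
  have hb := pvScatter_blocks q s 0 hs
  simp only [Nat.mul_zero, Nat.zero_add] at hb
  rw [hb]
  simp [pvP]

-- ===== VERDICT (by name: the statement is the Claim_ definition above) =====
theorem make_e_frac_list_spec : Claim_equal_make_e_frac_list := by
  intro limit _
  unfold Spec_make_e_frac_list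
  rw [pvA_eq_P, pvB_eq_P]
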